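-- pv_equiv track=rewrite | github.com/std-modelware/polytech-diskrete-2020 | Дроздова Дарья/lab2.py | SymmetryEvenNumb
-- ===== SOURCE A (Python) =====
-- def SymmetryEvenNumb(seq, n):
--     axes = list()
--     N = n // 2
--     for i in range(N):
--         if seq[N - 1::-1] == seq[N:]:
--             str = seq[:N] + '|' + seq[N:]
--             axes.append(str)
--         if seq[N - 1::-1] == seq[N + 1:]:
--             str = '(' + seq[0] + ')' + seq[1:N] + '(' + seq[N] + ')' + seq[N + 1:]
--             axes.append(str)
--         seq = seq[-1] + seq[:-1]
--     return axes
-- ===== SOURCE B (Python) =====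
-- def SymmetryEvenNumb(seq, n):
--     N = n // 2
--     L = len(seq)
--     if N <= 0 or L < 2 * N or 2 * N + 1 < L:
--         return []
--     d = seq + seq
--     e = seq[::-1] * 2
--     hits = [i for i in range(N) if d[L - i:2 * L - i] == e[i:L + i]]
--     if L == 2 * N:
--         return [d[L - i:L - i + N] + '|' + d[L - i + N:2 * L - i] for i in hits]
--     return ['(' + d[L - i] + ')' + d[L - i + 1:L - i + N] + '(' + d[L - i + N] + ')'
--             + d[L - i + N + 1:2 * L - i] for i in hits]
-- ===== Notes on version B (the rewrite author's own statement) =====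
-- stated objective: faster
-- what changed: Instead of rebuilding the rotated string on every loop iteration and testing two separate half-reversal conditions, B pre-checks once that len(seq) is n//2*2 or n//2*2+1 (otherwise no rotation can ever match and it returns [] immediately), slices each rotation out of the doubled string seq+seq, tests it with a single palindrome comparison against the matching window of the doubled reversed string, and builds the output as a filter-then-format two-pass.
import Mathlib
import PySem

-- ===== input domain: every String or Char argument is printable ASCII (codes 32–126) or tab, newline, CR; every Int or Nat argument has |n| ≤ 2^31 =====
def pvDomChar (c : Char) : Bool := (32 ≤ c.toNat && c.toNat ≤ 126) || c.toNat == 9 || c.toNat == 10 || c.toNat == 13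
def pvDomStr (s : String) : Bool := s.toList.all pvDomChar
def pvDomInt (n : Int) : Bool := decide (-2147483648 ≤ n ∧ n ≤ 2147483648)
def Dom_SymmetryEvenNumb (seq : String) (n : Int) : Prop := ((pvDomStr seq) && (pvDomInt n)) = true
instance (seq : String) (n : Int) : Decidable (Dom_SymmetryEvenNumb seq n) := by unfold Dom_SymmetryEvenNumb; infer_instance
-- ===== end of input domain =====

-- B replaces A's rebuild-the-rotation-each-step loop by slicing each rotation out of the doubled
-- string and comparing it against the matching window of the doubled reversed string (one
-- palindrome test), after a once-only length pre-check; objective: faster (constant factor).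

-- ===== PORT A =====
def SymmetryEvenNumb (seq : String) (n : Int) : List String :=
  let N := PySem.Int.floordiv n 2
  let res := (PySem.List.pyRange 0 N).foldl
    (fun (st : List Char × List (List Char)) _i =>
      let s := st.1
      let axes := st.2
      let axes := if PySem.List.slice? s (some (N - 1)) none (-1) == some (PySem.List.slice s (some N) none)
        then axes ++ [PySem.List.slice s none (some N) ++ '|' :: PySem.List.slice s (some N) none]
        else axes
      let axes := if PySem.List.slice? s (some (N - 1)) none (-1) == some (PySem.List.slice s (some (N + 1)) none)
        then axes ++ ['(' :: PySem.List.pyGetD s 0 ' ' :: ')' ::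
          (PySem.List.slice s (some 1) (some N) ++ '(' :: PySem.List.pyGetD s N ' ' :: ')' ::
            PySem.List.slice s (some (N + 1)) none)]
        else axes
      (PySem.List.pyGetD s (-1) ' ' :: PySem.List.slice s none (some (-1)), axes))
    (seq.toList, [])
  res.2.map String.ofList

-- ===== PORT B =====
def SymmetryEvenNumb_alt (seq : String) (n : Int) : List String :=
  let N := PySem.Int.floordiv n 2
  let s := seq.toList
  let L : Int := s.length
  if N ≤ 0 ∨ L < 2 * N ∨ 2 * N + 1 < L then []
  else
    let d := s ++ s
    let rev := s.reverse
    let e := rev ++ rev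
    let hits := (PySem.List.pyRange 0 N).filter
      (fun i => PySem.List.slice d (some (L - i)) (some (2 * L - i)) == PySem.List.slice e (some i) (some (L + i)))
    if L = 2 * N then
      hits.map (fun i => String.ofList
        (PySem.List.slice d (some (L - i)) (some (L - i + N)) ++ '|' ::
          PySem.List.slice d (some (L - i + N)) (some (2 * L - i))))
    else
      hits.map (fun i => String.ofList
        ('(' :: PySem.List.pyGetD d (L - i) ' ' :: ')' ::
          (PySem.List.slice d (some (L - i + 1)) (some (L - i + N)) ++
            '(' :: PySem.List.pyGetD d (L - i + N) ' ' :: ')' ::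
              PySem.List.slice d (some (L - i + N + 1)) (some (2 * L - i)))))

-- ===== PRECONDITION & SPEC =====
-- Pre_ excludes only the inputs on which A raises (IndexError: empty seq with n ≥ 2).
def Pre_SymmetryEvenNumb (seq : String) (n : Int) : Prop := seq = "" → n < 2
instance (seq : String) (n : Int) : Decidable (Pre_SymmetryEvenNumb seq n) := by
  unfold Pre_SymmetryEvenNumb; infer_instance

def pvWitness_SymmetryEvenNumb : String × Int := ("abba", 4)

def Spec_SymmetryEvenNumb (seq : String) (n : Int) (out : List String) : Prop :=
  out = SymmetryEvenNumb_alt seq n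
instance (seq : String) (n : Int) (out : List String) : Decidable (Spec_SymmetryEvenNumb seq n out) := by
  unfold Spec_SymmetryEvenNumb; infer_instance

-- ===== CLAIM (what is proved, stated in full; the proofs are below) =====
def Claim_equal_SymmetryEvenNumb : Prop := ∀ (seq : String) (n : Int),
  Dom_SymmetryEvenNumb seq n → Pre_SymmetryEvenNumb seq n →
    Spec_SymmetryEvenNumb seq n (SymmetryEvenNumb seq n)

-- ===== LEMMAS AND PROOFS =====

-- A's loop body, named: the seq update and the (up to two) appended axes of one iteration.
def pvStepSeq (s : List Char) : List Char :=
  PySem.List.pyGetD s (-1) ' ' :: PySem.List.slice s none (some (-1))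

def pvEmitA (N : Int) (s : List Char) : List (List Char) :=
  (if PySem.List.slice? s (some (N - 1)) none (-1) == some (PySem.List.slice s (some N) none)
    then [PySem.List.slice s none (some N) ++ '|' :: PySem.List.slice s (some N) none] else [])
  ++ (if PySem.List.slice? s (some (N - 1)) none (-1) == some (PySem.List.slice s (some (N + 1)) none)
    then ['(' :: PySem.List.pyGetD s 0 ' ' :: ')' ::
      (PySem.List.slice s (some 1) (some N) ++ '(' :: PySem.List.pyGetD s N ' ' :: ')' ::
        PySem.List.slice s (some (N + 1)) none)] else [])

def pvStepA (N : Int) (st : List Char × List (List Char)) : List Char × List (List Char) :=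
  (pvStepSeq st.1, st.2 ++ pvEmitA N st.1)

-- the j-th right rotation of s (for j ≤ s.length)
def pvRot (j : Nat) (s : List Char) : List Char :=
  s.drop (s.length - j) ++ s.take (s.length - j)

lemma pvPortA_eq (seq : String) (n : Int) :
    SymmetryEvenNumb seq n =
      (((PySem.List.pyRange 0 (PySem.Int.floordiv n 2)).foldl
          (fun st _ => pvStepA (PySem.Int.floordiv n 2) st) (seq.toList, [])).2).map String.ofList := by
  simp only [SymmetryEvenNumb]
  refine congrArg _ (congrArg Prod.snd ?_)
  apply PySem.List.foldl_congr_mem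
  intro acc x _
  simp only [pvStepA, pvStepSeq, pvEmitA]
  split_ifs <;> simp [List.append_assoc]

lemma pvFoldl_const {α σ : Type} (l : List α) (g : σ → σ) (init : σ) :
    l.foldl (fun st _ => g st) init = g^[l.length] init := by
  induction l generalizing init with
  | nil => rfl
  | cons x xs ih => simp [ih, Function.iterate_succ_apply]

lemma pvGetD_neg_one {t : List Char} (d : Char) (ht : t ≠ []) :
    PySem.List.pyGetD t (-1) d = t.getD (t.length - 1) d := by
  have h1 : 1 ≤ t.length := List.length_pos_iff.mpr ht
  have h2 : -((t.length : Int)) ≤ -1 := by omega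
  simp [PySem.List.pyGetD, PySem.List.pyGet?, PySem.List.pyIdx?, h2,
    List.getD_eq_getElem?_getD]

lemma pvRevTake (xs : List Char) (m : Nat) (hm : m ≤ xs.length) :
    (List.range m).filterMap (fun k => xs[(m - 1 - k)]?) = (xs.take m).reverse := by
  induction m with
  | zero => simp
  | succ m ih =>
    have hm' : m < xs.length := by omega
    have e1 : List.filterMap (fun k => xs[(m + 1 - 1 - k)]?) (List.range (m + 1))
        = List.filterMap (fun k => xs[(m - k)]?) (List.range (m + 1)) := by
      apply List.filterMap_congr; intro x hx; congr 1
    rw [e1, List.range_succ_eq_map, List.filterMap_cons]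
    simp only [Nat.sub_zero, List.getElem?_eq_getElem hm', List.filterMap_map]
    have hc : List.filterMap ((fun k => xs[(m - k)]?) ∘ Nat.succ) (List.range m)
        = List.filterMap (fun k => xs[(m - 1 - k)]?) (List.range m) := by
      apply List.filterMap_congr; intro x hx; simp only [Function.comp]; congr 1; omega
    rw [hc, ih (by omega)]
    have ht : List.take (m + 1) xs = List.take m xs ++ [xs[m]] := by
      rw [List.take_add_one, List.getElem?_eq_getElem hm']
      simp
    rw [ht, List.reverse_append]
    simp

lemma pvSliceRev (xs : List Char) (a : Nat) :
    PySem.List.slice? xs (some (a : Int)) none (-1) = some ((xs.take (a + 1)).reverse) := by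
  rcases eq_or_ne xs [] with h | h
  · subst h; simp [PySem.List.slice?, PySem.List.sliceIndices]
  · have h1 : 1 ≤ xs.length := List.length_pos_iff.mpr h
    have hns : ¬ ((a : Int) < 0) := by omega
    simp only [PySem.List.slice?, PySem.List.sliceIndices, if_neg (by norm_num : ¬((-1:Int) = 0))]
    norm_num
    rw [if_neg hns]
    have hm1 : (min ((a:Int)) ((xs.length:Int) - 1)) = ((min (a+1) xs.length : Nat) : Int) - 1 := by
      push_cast; omega
    rw [hm1]
    rw [if_pos (by push_cast; omega : (-1 : Int) < ((min (a+1) xs.length : Nat) : Int) - 1)]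
    have htn : ((((min (a+1) xs.length : Nat)) : Int) - 1 + 1).toNat = min (a+1) xs.length := by
      push_cast; omega
    rw [htn]
    have hfun : ∀ x ∈ List.range (min (a+1) xs.length),
        xs[((((min (a+1) xs.length : Nat)) : Int) - 1 + -(x:Int)).toNat]?
          = xs[(min (a+1) xs.length - 1 - x)]? := by
      intro x hx
      congr 1
      omega
    rw [List.filterMap_congr hfun, pvRevTake _ _ (by omega)]
    conv_rhs => rw [List.take_eq_take_min]

lemma pvRot_len (s : List Char) (j : Nat) : (pvRot j s).length = s.length := by
  simp [pvRot]

lemma pvRot_zero (s : List Char) : pvRot 0 s = s := by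
  simp [pvRot]

lemma pvStepSeq_len (t : List Char) (ht : t ≠ []) : (pvStepSeq t).length = t.length := by
  have h1 : 1 ≤ t.length := List.length_pos_iff.mpr ht
  simp [pvStepSeq, PySem.List.slice_to_neg_one]
  omega

lemma pvStepSeq_rot (s : List Char) (j : Nat) (hj : j < s.length) :
    pvStepSeq (pvRot j s) = pvRot (j + 1) s := by
  have hlen1 : (s.take (s.length - j)).length = s.length - j := by simp
  have hne2 : s.take (s.length - j) ≠ [] := by
    apply List.ne_nil_of_length_pos; rw [hlen1]; omega
  have hu : pvRot j s ≠ [] := by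
    apply List.ne_nil_of_length_pos; rw [pvRot_len]; omega
  unfold pvStepSeq
  rw [pvGetD_neg_one _ hu, PySem.List.slice_to_neg_one, pvRot_len]
  have h_dl : (pvRot j s).dropLast = s.drop (s.length - j) ++ s.take (s.length - j - 1) := by
    unfold pvRot
    rw [List.dropLast_append_of_ne_nil hne2]
    congr 1
    rw [List.dropLast_eq_take, hlen1, List.take_take]
    congr 1
    omega
  have hdroplen : (s.drop (s.length - j)).length = j := by simp; omega
  have hidx2 : s.length - j - 1 < s.length := by omega
  have h_g : (pvRot j s).getD (s.length - 1) ' ' = s[s.length - j - 1]'hidx2 := by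
    have hidx : s.length - 1 < (pvRot j s).length := by rw [pvRot_len]; omega
    rw [List.getD_eq_getElem _ _ hidx]
    unfold pvRot
    rw [List.getElem_append_right (by rw [hdroplen]; omega)]
    rw [List.getElem_take]
    congr 1
    rw [hdroplen]
    omega
  rw [h_dl, h_g]
  unfold pvRot
  have e : s.length - (j + 1) = s.length - j - 1 := by omega
  rw [e, List.drop_eq_getElem_cons hidx2]
  have e2 : s.length - j - 1 + 1 = s.length - j := by omega
  rw [e2]
  simp

lemma pvIterA (N : Int) (k : Nat) (s : List Char) (axes : List (List Char))
    (hk : k ≤ s.length) :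
    (pvStepA N)^[k] (s, axes) =
      (pvRot k s, axes ++ (List.range k).flatMap (fun j => pvEmitA N (pvRot j s))) := by
  induction k with
  | zero => simp [pvRot_zero]
  | succ k ih =>
    rw [Function.iterate_succ_apply', ih (by omega)]
    unfold pvStepA
    rw [pvStepSeq_rot s k (by omega)]
    rw [List.range_succ]
    simp [List.append_assoc]

lemma pvIterA_nil (N : Int) (k : Nat) (s : List Char) (axes : List (List Char)) (hs : s ≠ [])
    (hemit : ∀ t : List Char, t.length = s.length → pvEmitA N t = []) :
    ((pvStepA N)^[k] (s, axes)).2 = axes := by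
  suffices h : ((pvStepA N)^[k] (s, axes)).2 = axes ∧
      ((pvStepA N)^[k] (s, axes)).1.length = s.length ∧ ((pvStepA N)^[k] (s, axes)).1 ≠ [] by
    exact h.1
  induction k with
  | zero => exact ⟨rfl, rfl, hs⟩
  | succ k ih =>
    rw [Function.iterate_succ_apply']
    refine ⟨?_, ?_, ?_⟩
    · show ((pvStepA N)^[k] (s, axes)).2 ++ pvEmitA N ((pvStepA N)^[k] (s, axes)).1 = axes
      rw [hemit _ ih.2.1, ih.1, List.append_nil]
    · show (pvStepSeq ((pvStepA N)^[k] (s, axes)).1).length = s.length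
      rw [pvStepSeq_len _ ih.2.2, ih.2.1]
    · show pvStepSeq ((pvStepA N)^[k] (s, axes)).1 ≠ []
      simp [pvStepSeq]

lemma pvCondE_iff (N : Int) (Nn : Nat) (hN : N = (Nn : Int)) (h1 : 1 ≤ Nn) (t : List Char) :
    (PySem.List.slice? t (some (N - 1)) none (-1) == some (PySem.List.slice t (some N) none)) = true ↔
      (t.take Nn).reverse = t.drop Nn := by
  subst hN
  have e1 : (Nn : Int) - 1 = ((Nn - 1 : Nat) : Int) := by omega
  rw [e1, pvSliceRev]
  have e2 : Nn - 1 + 1 = Nn := by omega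
  rw [e2, PySem.List.slice_from_natCast]
  simp

lemma pvCondO_iff (N : Int) (Nn : Nat) (hN : N = (Nn : Int)) (h1 : 1 ≤ Nn) (t : List Char) :
    (PySem.List.slice? t (some (N - 1)) none (-1) == some (PySem.List.slice t (some (N + 1)) none)) = true ↔
      (t.take Nn).reverse = t.drop (Nn + 1) := by
  subst hN
  have e1 : (Nn : Int) - 1 = ((Nn - 1 : Nat) : Int) := by omega
  have e3 : (Nn : Int) + 1 = ((Nn + 1 : Nat) : Int) := by omega
  rw [e1, e3, pvSliceRev, PySem.List.slice_from_natCast]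
  have e2 : Nn - 1 + 1 = Nn := by omega
  rw [e2]
  simp

lemma pvPalEven (r : List Char) (Nn : Nat) (hr : r.length = 2 * Nn) :
    (r.take Nn).reverse = r.drop Nn ↔ r.reverse = r := by
  constructor
  · intro hc
    calc r.reverse = (r.take Nn ++ r.drop Nn).reverse := by rw [List.take_append_drop]
      _ = (r.drop Nn).reverse ++ (r.take Nn).reverse := List.reverse_append
      _ = r.take Nn ++ r.drop Nn := by rw [← hc, List.reverse_reverse, hc]
      _ = r := List.take_append_drop _ _
  · intro hp
    have h := List.reverse_take (l := r) (i := Nn)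
    rw [hp] at h
    have e : r.length - Nn = Nn := by omega
    rw [e] at h
    exact h

lemma pvPalOdd (r : List Char) (Nn : Nat) (hr : r.length = 2 * Nn + 1) :
    (r.take Nn).reverse = r.drop (Nn + 1) ↔ r.reverse = r := by
  have hNn : Nn < r.length := by omega
  have h1 : r.drop Nn = r[Nn] :: r.drop (Nn + 1) := List.drop_eq_getElem_cons hNn
  have h2 : r = r.take Nn ++ r[Nn] :: r.drop (Nn + 1) := by
    conv_lhs => rw [← List.take_append_drop Nn r, h1]
  have hrev : r.reverse = (r.drop (Nn + 1)).reverse ++ r[Nn] :: (r.take Nn).reverse := by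
    conv_lhs => rw [h2]
    simp
  constructor
  · intro hc
    rw [hrev, ← hc, List.reverse_reverse, hc]
    exact h2.symm
  · intro hp
    rw [hrev] at hp
    conv_rhs at hp => rw [h2]
    have hlen : (r.drop (Nn + 1)).reverse.length = (r.take Nn).length := by
      simp; omega
    have h3 : (r.drop (Nn + 1)).reverse = r.take Nn := (List.append_inj hp hlen).1
    rw [← h3, List.reverse_reverse]

lemma pvRot_eq_ddslice (s : List Char) (j : Nat) (hj : j ≤ s.length) :
    ((s ++ s).drop (s.length - j)).take s.length = pvRot j s := by
  unfold pvRot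
  rw [List.drop_append]
  have e : s.length - j - s.length = 0 := by omega
  rw [e, List.drop_zero, List.take_append]
  have hl : (s.drop (s.length - j)).length = j := by simp; omega
  rw [List.take_of_length_le (by rw [hl]; omega : (s.drop (s.length - j)).length ≤ s.length)]
  congr 1
  rw [hl]

lemma pvRevRot (s : List Char) (j : Nat) (hj : j ≤ s.length) :
    ((s.reverse ++ s.reverse).drop j).take s.length = (pvRot j s).reverse := by
  have h := pvRot_eq_ddslice s.reverse (s.length - j) (by simp)
  rw [List.length_reverse] at h
  have e : s.length - (s.length - j) = j := by omega
  rw [e] at h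
  rw [h]
  unfold pvRot
  rw [List.length_reverse, e, List.reverse_append,
    List.reverse_take (l := s) (i := s.length - j), List.reverse_drop (l := s) (i := s.length - j), e]

lemma pvEmitA_even (N : Int) (Nn : Nat) (hN : N = (Nn : Int)) (h1 : 1 ≤ Nn)
    (r : List Char) (hr : r.length = 2 * Nn) :
    pvEmitA N r = if r.reverse = r then [r.take Nn ++ '|' :: r.drop Nn] else [] := by
  subst hN
  have hcE := pvCondE_iff ((Nn : Int)) Nn rfl h1 r
  have hcO := pvCondO_iff ((Nn : Int)) Nn rfl h1 r
  have hOfalse : ¬((PySem.List.slice? r (some ((Nn : Int) - 1)) none (-1) ==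
      some (PySem.List.slice r (some ((Nn : Int) + 1)) none)) = true) := by
    intro hx
    have h := congrArg List.length (hcO.mp hx)
    simp at h
    omega
  unfold pvEmitA
  rw [if_neg hOfalse, List.append_nil]
  by_cases hp : r.reverse = r
  · rw [if_pos (hcE.mpr ((pvPalEven r Nn hr).mpr hp)), if_pos hp,
      PySem.List.slice_to_natCast, PySem.List.slice_from_natCast]
  · rw [if_neg (fun hx => hp ((pvPalEven r Nn hr).mp (hcE.mp hx))), if_neg hp]

lemma pvEmitA_odd (N : Int) (Nn : Nat) (hN : N = (Nn : Int)) (h1 : 1 ≤ Nn)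
    (r : List Char) (hr : r.length = 2 * Nn + 1) :
    pvEmitA N r = if r.reverse = r then
      ['(' :: r.getD 0 ' ' :: ')' ::
        ((r.drop 1).take (Nn - 1) ++ '(' :: r.getD Nn ' ' :: ')' :: r.drop (Nn + 1))]
      else [] := by
  subst hN
  have hcO := pvCondO_iff ((Nn : Int)) Nn rfl h1 r
  have hEfalse : ¬((PySem.List.slice? r (some ((Nn : Int) - 1)) none (-1) ==
      some (PySem.List.slice r (some ((Nn : Int))) none)) = true) := by
    intro hx
    have h := congrArg List.length ((pvCondE_iff ((Nn : Int)) Nn rfl h1 r).mp hx)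
    simp at h
    omega
  unfold pvEmitA
  rw [if_neg hEfalse, List.nil_append]
  have e3 : ((Nn : Int)) + 1 = ((Nn + 1 : Nat) : Int) := by omega
  by_cases hp : r.reverse = r
  · rw [if_pos (hcO.mpr ((pvPalOdd r Nn hr).mpr hp)), if_pos hp]
    rw [e3, PySem.List.slice_from_natCast,
      show (0 : Int) = ((0 : Nat) : Int) from rfl, PySem.List.pyGetD_natCast,
      show (1 : Int) = ((1 : Nat) : Int) from rfl, PySem.List.slice_natCast,
      PySem.List.pyGetD_natCast]
  · rw [if_neg (fun hx => hp ((pvPalOdd r Nn hr).mp (hcO.mp hx))), if_neg hp]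

lemma pvEmitA_nil (N : Int) (Nn : Nat) (hN : N = (Nn : Int)) (h1 : 1 ≤ Nn)
    (r : List Char) (hr1 : 1 ≤ r.length) (h2 : r.length ≠ 2 * Nn) (h3 : r.length ≠ 2 * Nn + 1) :
    pvEmitA N r = [] := by
  subst hN
  have hcE := pvCondE_iff ((Nn : Int)) Nn rfl h1 r
  have hcO := pvCondO_iff ((Nn : Int)) Nn rfl h1 r
  unfold pvEmitA
  rw [if_neg (fun hx => ?_), if_neg (fun hx => ?_)]
  · rfl
  · have h := congrArg List.length (hcO.mp hx)
    simp at h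
    omega
  · have h := congrArg List.length (hcE.mp hx)
    simp at h
    omega

lemma pvFlatMap_congr {α β : Type} (l : List α) (f g : α → List β)
    (h : ∀ x ∈ l, f x = g x) : l.flatMap f = l.flatMap g := by
  induction l with
  | nil => rfl
  | cons x xs ih =>
    simp [h x (by simp), ih (fun y hy => h y (by simp [hy]))]

lemma pvFlatMap_ite_singleton {α β : Type} (l : List α) (p : α → Prop) [DecidablePred p] (f : α → β) :
    l.flatMap (fun x => if p x then [f x] else []) = (l.filter (fun x => decide (p x))).map f := by
  induction l with
  | nil => rfl
  | cons x xs ih =>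
    by_cases h : p x <;> simp [h, ih]

lemma pvRotTakePiece (s : List Char) (j a k : Nat) (hj : j ≤ s.length) (hk : a + k ≤ s.length) :
    ((s ++ s).drop (s.length - j + a)).take k = ((pvRot j s).drop a).take k := by
  rw [← pvRot_eq_ddslice s j hj, List.drop_take, List.drop_drop, List.take_take,
    min_eq_left (by omega : k ≤ s.length - a)]

lemma pvRot_getD (s : List Char) (j k : Nat) (hj : j ≤ s.length) (hk : k < s.length) :
    (pvRot j s).getD k ' ' = (s ++ s).getD (s.length - j + k) ' ' := by
  have h1 : k < (pvRot j s).length := by rw [pvRot_len]; omega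
  have h2 : s.length - j + k < (s ++ s).length := by simp; omega
  rw [List.getD_eq_getElem _ _ h1, List.getD_eq_getElem _ _ h2]
  rw [List.getElem_of_eq (pvRot_eq_ddslice s j hj).symm h1]
  rw [List.getElem_take, List.getElem_drop]


lemma pvFilterEq (s : List Char) (Nn : Nat) (hNn : Nn ≤ s.length) :
    (List.range Nn).filter ((fun i => PySem.List.slice (s ++ s) (some (((s.length : Int)) - i)) (some (2 * ((s.length : Int)) - i)) ==
        PySem.List.slice (s.reverse ++ s.reverse) (some i) (some (((s.length : Int)) + i))) ∘ (fun k : Nat => (k : Int)))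
      = (List.range Nn).filter (fun j => decide ((pvRot j s).reverse = pvRot j s)) := by
  apply List.filter_congr
  intro j hjr
  have hj : j < Nn := List.mem_range.mp hjr
  have hjL : j ≤ s.length := by omega
  simp only [Function.comp]
  have hd : PySem.List.slice (s ++ s) (some (((s.length : Int)) - (j : Int))) (some (2 * ((s.length : Int)) - (j : Int))) = pvRot j s := by
    rw [show ((s.length : Int)) - (j : Int) = ((s.length - j : Nat) : Int) by omega,
        show 2 * ((s.length : Int)) - (j : Int) = ((2 * s.length - j : Nat) : Int) by omega,
        PySem.List.slice_natCast,
        show 2 * s.length - j - (s.length - j) = s.length by omega]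
    exact pvRot_eq_ddslice s j hjL
  have he : PySem.List.slice (s.reverse ++ s.reverse) (some ((j : Int))) (some (((s.length : Int)) + (j : Int))) = (pvRot j s).reverse := by
    rw [show ((s.length : Int)) + (j : Int) = ((s.length + j : Nat) : Int) by omega,
        PySem.List.slice_natCast,
        show s.length + j - j = s.length by omega]
    exact pvRevRot s j hjL
  rw [hd, he, Bool.beq_eq_decide_eq]
  exact decide_eq_decide.mpr eq_comm

lemma pvEvenCase (s : List Char) (Nn : Nat) (h1 : 1 ≤ Nn) (hL : s.length = 2 * Nn) :
    ((List.range Nn).flatMap (fun j => pvEmitA ((Nn : Int)) (pvRot j s))).map String.ofList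
      = (((List.range Nn).map (fun k : Nat => (k : Int))).filter
          (fun i => PySem.List.slice (s ++ s) (some (((s.length : Int)) - i)) (some (2 * ((s.length : Int)) - i)) ==
            PySem.List.slice (s.reverse ++ s.reverse) (some i) (some (((s.length : Int)) + i)))).map
          (fun i => String.ofList
            (PySem.List.slice (s ++ s) (some (((s.length : Int)) - i)) (some (((s.length : Int)) - i + (Nn : Int))) ++ '|' ::
              PySem.List.slice (s ++ s) (some (((s.length : Int)) - i + (Nn : Int))) (some (2 * ((s.length : Int)) - i)))) := by
  have hrewrite : ∀ j ∈ List.range Nn, pvEmitA ((Nn : Int)) (pvRot j s) =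
      (fun j => if (pvRot j s).reverse = pvRot j s
        then [(pvRot j s).take Nn ++ '|' :: (pvRot j s).drop Nn] else []) j := by
    intro j _
    exact pvEmitA_even _ Nn rfl h1 _ (by rw [pvRot_len]; omega)
  rw [pvFlatMap_congr _ _ _ hrewrite, pvFlatMap_ite_singleton, List.map_map, List.filter_map,
    List.map_map, pvFilterEq s Nn (by omega)]
  apply List.map_congr_left
  intro j hjmem
  have hj : j < Nn := List.mem_range.mp (List.mem_filter.mp hjmem).1
  have hjL : j ≤ s.length := by omega
  simp only [Function.comp]
  congr 1
  have hp1 : PySem.List.slice (s ++ s) (some (((s.length : Int)) - (j : Int))) (some (((s.length : Int)) - (j : Int) + (Nn : Int))) = (pvRot j s).take Nn := by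
    rw [show ((s.length : Int)) - (j : Int) = ((s.length - j : Nat) : Int) by omega,
        show ((s.length - j : Nat) : Int) + (Nn : Int) = ((s.length - j + Nn : Nat) : Int) by push_cast; omega,
        PySem.List.slice_natCast,
        show s.length - j + Nn - (s.length - j) = Nn by omega]
    have h0 := pvRotTakePiece s j 0 Nn hjL (by omega)
    simpa using h0
  have hp2 : PySem.List.slice (s ++ s) (some (((s.length : Int)) - (j : Int) + (Nn : Int))) (some (2 * ((s.length : Int)) - (j : Int))) = (pvRot j s).drop Nn := by
    rw [show ((s.length : Int)) - (j : Int) = ((s.length - j : Nat) : Int) by omega,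
        show ((s.length - j : Nat) : Int) + (Nn : Int) = ((s.length - j + Nn : Nat) : Int) by push_cast; omega,
        show 2 * ((s.length : Int)) - (j : Int) = ((2 * s.length - j : Nat) : Int) by omega,
        PySem.List.slice_natCast,
        show 2 * s.length - j - (s.length - j + Nn) = s.length - Nn by omega]
    rw [pvRotTakePiece s j Nn (s.length - Nn) hjL (by omega)]
    exact List.take_of_length_le (le_of_eq (by rw [List.length_drop, pvRot_len]))
  rw [hp1, hp2]

lemma pvOddCase (s : List Char) (Nn : Nat) (h1 : 1 ≤ Nn) (hL : s.length = 2 * Nn + 1) :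
    ((List.range Nn).flatMap (fun j => pvEmitA ((Nn : Int)) (pvRot j s))).map String.ofList
      = (((List.range Nn).map (fun k : Nat => (k : Int))).filter
          (fun i => PySem.List.slice (s ++ s) (some (((s.length : Int)) - i)) (some (2 * ((s.length : Int)) - i)) ==
            PySem.List.slice (s.reverse ++ s.reverse) (some i) (some (((s.length : Int)) + i)))).map
          (fun i => String.ofList
            ('(' :: PySem.List.pyGetD (s ++ s) (((s.length : Int)) - i) ' ' :: ')' ::
              (PySem.List.slice (s ++ s) (some (((s.length : Int)) - i + 1)) (some (((s.length : Int)) - i + (Nn : Int))) ++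
                '(' :: PySem.List.pyGetD (s ++ s) (((s.length : Int)) - i + (Nn : Int)) ' ' :: ')' ::
                  PySem.List.slice (s ++ s) (some (((s.length : Int)) - i + (Nn : Int) + 1)) (some (2 * ((s.length : Int)) - i))))) := by
  have hrewrite : ∀ j ∈ List.range Nn, pvEmitA ((Nn : Int)) (pvRot j s) =
      (fun j => if (pvRot j s).reverse = pvRot j s
        then ['(' :: (pvRot j s).getD 0 ' ' :: ')' ::
          (((pvRot j s).drop 1).take (Nn - 1) ++ '(' :: (pvRot j s).getD Nn ' ' :: ')' ::
            (pvRot j s).drop (Nn + 1))] else []) j := by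
    intro j _
    exact pvEmitA_odd _ Nn rfl h1 _ (by rw [pvRot_len]; omega)
  rw [pvFlatMap_congr _ _ _ hrewrite, pvFlatMap_ite_singleton, List.map_map, List.filter_map,
    List.map_map, pvFilterEq s Nn (by omega)]
  apply List.map_congr_left
  intro j hjmem
  have hj : j < Nn := List.mem_range.mp (List.mem_filter.mp hjmem).1
  have hjL : j ≤ s.length := by omega
  simp only [Function.comp]
  congr 1
  have hg1 : PySem.List.pyGetD (s ++ s) (((s.length : Int)) - (j : Int)) ' ' = (pvRot j s).getD 0 ' ' := by
    rw [show ((s.length : Int)) - (j : Int) = ((s.length - j : Nat) : Int) by omega,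
        PySem.List.pyGetD_natCast]
    have h0 := pvRot_getD s j 0 hjL (by omega)
    rw [Nat.add_zero] at h0
    rw [← h0]
  have hs1 : PySem.List.slice (s ++ s) (some (((s.length : Int)) - (j : Int) + 1)) (some (((s.length : Int)) - (j : Int) + (Nn : Int))) = ((pvRot j s).drop 1).take (Nn - 1) := by
    rw [show ((s.length : Int)) - (j : Int) = ((s.length - j : Nat) : Int) by omega,
        show ((s.length - j : Nat) : Int) + 1 = ((s.length - j + 1 : Nat) : Int) by push_cast; omega,
        show ((s.length - j : Nat) : Int) + (Nn : Int) = ((s.length - j + Nn : Nat) : Int) by push_cast; omega,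
        PySem.List.slice_natCast,
        show s.length - j + Nn - (s.length - j + 1) = Nn - 1 by omega]
    exact pvRotTakePiece s j 1 (Nn - 1) hjL (by omega)
  have hg2 : PySem.List.pyGetD (s ++ s) (((s.length : Int)) - (j : Int) + (Nn : Int)) ' ' = (pvRot j s).getD Nn ' ' := by
    rw [show ((s.length : Int)) - (j : Int) = ((s.length - j : Nat) : Int) by omega,
        show ((s.length - j : Nat) : Int) + (Nn : Int) = ((s.length - j + Nn : Nat) : Int) by push_cast; omega,
        PySem.List.pyGetD_natCast]
    have h0 := pvRot_getD s j Nn hjL (by omega)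
    rw [← h0]
  have hs2 : PySem.List.slice (s ++ s) (some (((s.length : Int)) - (j : Int) + (Nn : Int) + 1)) (some (2 * ((s.length : Int)) - (j : Int))) = (pvRot j s).drop (Nn + 1) := by
    rw [show ((s.length : Int)) - (j : Int) = ((s.length - j : Nat) : Int) by omega,
        show ((s.length - j : Nat) : Int) + (Nn : Int) = ((s.length - j + Nn : Nat) : Int) by push_cast; omega,
        show ((s.length - j + Nn : Nat) : Int) + 1 = ((s.length - j + Nn + 1 : Nat) : Int) by push_cast; omega,
        show 2 * ((s.length : Int)) - (j : Int) = ((2 * s.length - j : Nat) : Int) by omega,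
        PySem.List.slice_natCast,
        show 2 * s.length - j - (s.length - j + Nn + 1) = s.length - (Nn + 1) by omega,
        show s.length - j + Nn + 1 = s.length - j + (Nn + 1) by omega]
    rw [pvRotTakePiece s j (Nn + 1) (s.length - (Nn + 1)) hjL (by omega)]
    exact List.take_of_length_le (le_of_eq (by rw [List.length_drop, pvRot_len]))
  rw [hg1, hs1, hg2, hs2]

lemma pvMain (seq : String) (n : Int) (hpre : seq = "" → n < 2) :
    SymmetryEvenNumb seq n = SymmetryEvenNumb_alt seq n := by
  rw [pvPortA_eq]
  simp only [SymmetryEvenNumb_alt]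
  by_cases hN0 : PySem.Int.floordiv n 2 ≤ 0
  · have hrange : PySem.List.pyRange 0 (PySem.Int.floordiv n 2) = ([] : List Int) := by
      rw [List.eq_nil_iff_forall_not_mem]
      intro x hx
      rw [PySem.List.mem_pyRange_one] at hx
      omega
    rw [hrange, if_pos (Or.inl hN0)]
    rfl
  · have hNpos : 0 < PySem.Int.floordiv n 2 := by omega
    obtain ⟨Nn, hNn, hNn1⟩ : ∃ Nn : Nat, PySem.Int.floordiv n 2 = (Nn : Int) ∧ 1 ≤ Nn :=
      ⟨(PySem.Int.floordiv n 2).toNat, by omega, by omega⟩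
    have hs : seq.toList ≠ [] := by
      intro h
      have hseq : seq = "" := String.toList_eq_nil_iff.mp h
      have h2 := hpre hseq
      have h3 : PySem.Int.floordiv n 2 < 1 := by
        rw [PySem.Int.floordiv_lt_iff_lt_mul (by norm_num)]
        omega
      omega
    have hL1 : 1 ≤ seq.toList.length := List.length_pos_iff.mpr hs
    rw [hNn, PySem.List.pyRange_zero_natCast, pvFoldl_const, List.length_map, List.length_range]
    by_cases hL2 : seq.toList.length = 2 * Nn
    · rw [if_neg (by omega : ¬((Nn : Int) ≤ 0 ∨ ((seq.toList.length : Int)) < 2 * (Nn : Int) ∨ 2 * (Nn : Int) + 1 < ((seq.toList.length : Int)))),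
        if_pos (by omega : ((seq.toList.length : Int)) = 2 * (Nn : Int))]
      have hiter := congrArg Prod.snd (pvIterA ((Nn : Int)) Nn seq.toList [] (by omega))
      simp only [List.nil_append] at hiter
      rw [hiter]
      exact pvEvenCase seq.toList Nn hNn1 hL2
    · by_cases hL3 : seq.toList.length = 2 * Nn + 1
      · rw [if_neg (by omega : ¬((Nn : Int) ≤ 0 ∨ ((seq.toList.length : Int)) < 2 * (Nn : Int) ∨ 2 * (Nn : Int) + 1 < ((seq.toList.length : Int)))),
          if_neg (by omega : ¬(((seq.toList.length : Int)) = 2 * (Nn : Int)))]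
        have hiter := congrArg Prod.snd (pvIterA ((Nn : Int)) Nn seq.toList [] (by omega))
        simp only [List.nil_append] at hiter
        rw [hiter]
        exact pvOddCase seq.toList Nn hNn1 hL3
      · rw [if_pos (by omega : ((Nn : Int) ≤ 0 ∨ ((seq.toList.length : Int)) < 2 * (Nn : Int) ∨ 2 * (Nn : Int) + 1 < ((seq.toList.length : Int))))]
        rw [pvIterA_nil ((Nn : Int)) Nn seq.toList [] hs
          (fun t ht => pvEmitA_nil _ Nn rfl hNn1 t (by omega) (by omega) (by omega))]
        rfl

theorem SymmetryEvenNumb_spec : Claim_equal_SymmetryEvenNumb := by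
  intro seq n _ hpre
  show SymmetryEvenNumb seq n = SymmetryEvenNumb_alt seq n
  exact pvMain seq n hpre
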